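-- pv_equiv track=rewrite | github.com/dheerajalim/metaheuristic | Lab SAT Checker/GSAT.py | positive_gain
-- ===== SOURCE A (Python) =====
-- def positive_gain(sol_list_init, cnf_formula_unsat):
--     positive_gain = []
--     for variable in sol_list_init:
--         variable_count_unsat = 0
--
--         '''Checking fot the unsat clauses which contain the required parameter'''
--         for unsat_clause in cnf_formula_unsat:
--             if variable in unsat_clause or (-1 * variable) in unsat_clause:
--                 variable_count_unsat += 1   # Keeping a count of the clauses
--
--         positive_gain.append(variable_count_unsat)
--     return positive_gain
-- ===== SOURCE B (Python) =====
-- def positive_gain(sol_list_init, cnf_formula_unsat):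
--     counts = {}
--     for clause in cnf_formula_unsat:
--         for a in set(abs(lit) for lit in clause):
--             counts[a] = counts.get(a, 0) + 1
--     return [counts.get(abs(v), 0) for v in sol_list_init]
-- ===== Notes on version B (the rewrite author's own statement) =====
-- stated objective: faster
-- what changed: Replaced A's per-variable scan over all clauses with a single pass that counts each distinct absolute literal value per clause in a dict, then one dict lookup per variable.
import Mathlib
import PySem

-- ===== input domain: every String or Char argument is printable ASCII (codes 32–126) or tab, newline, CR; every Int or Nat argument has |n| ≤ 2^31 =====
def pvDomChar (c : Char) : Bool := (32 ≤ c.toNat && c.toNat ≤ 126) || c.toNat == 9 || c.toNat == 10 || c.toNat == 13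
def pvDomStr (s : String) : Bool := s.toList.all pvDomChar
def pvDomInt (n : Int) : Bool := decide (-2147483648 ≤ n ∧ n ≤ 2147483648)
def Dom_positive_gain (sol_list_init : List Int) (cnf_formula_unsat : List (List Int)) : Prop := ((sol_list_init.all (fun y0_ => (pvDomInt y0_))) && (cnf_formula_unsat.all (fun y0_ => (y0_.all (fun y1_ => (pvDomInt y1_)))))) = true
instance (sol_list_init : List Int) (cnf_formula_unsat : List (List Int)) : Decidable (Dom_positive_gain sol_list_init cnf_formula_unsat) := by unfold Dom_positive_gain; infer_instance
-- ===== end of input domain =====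

-- B replaces A's per-variable scan of all clauses (O(V·C·L)) with one pass that counts,
-- per clause, each distinct absolute literal value in a dict, then one lookup per variable (O(C·L + V)).

-- ===== PORT A =====
def positive_gain (sol_list_init : List Int) (cnf_formula_unsat : List (List Int)) : List Int :=
  sol_list_init.foldl (fun acc var =>
    acc ++ [cnf_formula_unsat.foldl
      (fun cnt unsat_clause =>
        if unsat_clause.contains var || unsat_clause.contains (-1 * var) then cnt + 1 else cnt)
      (0 : Int)]) []

-- ===== PORT B =====
def positive_gain_alt (sol_list_init : List Int) (cnf_formula_unsat : List (List Int)) : List Int :=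
  let counts : PySem.Dict Int Int :=
    cnf_formula_unsat.foldl (fun d clause =>
      (PySem.Set.ofList (clause.map (fun lit => |lit|))).foldl
        (fun d a => d.insert a (d.getD a 0 + 1)) d)
      PySem.Dict.empty
  sol_list_init.map (fun v => counts.getD |v| 0)

-- ===== PRECONDITION & SPEC =====
def Spec_positive_gain (sol_list_init : List Int) (cnf_formula_unsat : List (List Int)) (out : List Int) : Prop := out = positive_gain_alt sol_list_init cnf_formula_unsat
instance (sol_list_init : List Int) (cnf_formula_unsat : List (List Int)) (out : List Int) : Decidable (Spec_positive_gain sol_list_init cnf_formula_unsat out) := by unfold Spec_positive_gain; infer_instance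

-- ===== CLAIM (what is proved, stated in full; the proofs are below) =====
def Claim_equal_positive_gain : Prop := ∀ (sol_list_init : List Int) (cnf_formula_unsat : List (List Int)), Dom_positive_gain sol_list_init cnf_formula_unsat → Spec_positive_gain sol_list_init cnf_formula_unsat (positive_gain sol_list_init cnf_formula_unsat)

-- ===== LEMMAS AND PROOFS =====

-- 'v in clause or -v in clause' is exactly '|v| in the abs-image of the clause'.
theorem pv_mem_abs (c : List Int) (v : Int) :
    (|v| ∈ c.map (fun lit => |lit|)) ↔ (c.contains v || c.contains ((-1) * v)) = true := by
  simp only [List.mem_map, List.contains_eq_mem, Bool.or_eq_true, decide_eq_true_eq, neg_one_mul]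
  constructor
  · rintro ⟨l, hl, habs⟩
    rcases abs_eq_abs.mp habs with h | h
    · exact Or.inl (h ▸ hl)
    · exact Or.inr (by simpa [h] using hl)
  · rintro (h | h)
    · exact ⟨v, h, rfl⟩
    · exact ⟨-v, h, by simp⟩

-- The dict built by B's single pass holds, at key |v|, exactly A's per-variable clause count.
theorem pv_counts_getD (cnf : List (List Int)) (d : PySem.Dict Int Int) (v : Int) :
    (cnf.foldl (fun d clause =>
        (PySem.Set.ofList (clause.map (fun lit => |lit|))).foldl
          (fun d a => d.insert a (d.getD a 0 + 1)) d) d).getD |v| 0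
      = d.getD |v| 0
        + (cnf.countP (fun c => c.contains v || c.contains ((-1) * v)) : Int) := by
  induction cnf generalizing d with
  | nil => simp
  | cons c cs ih =>
    simp only [List.foldl_cons, List.countP_cons, ih,
      PySem.Dict.getD_foldl_insert_add_one]
    have hset : List.count |v| (PySem.Set.ofList (c.map (fun lit => |lit|)))
        = if (c.contains v || c.contains ((-1) * v)) = true then 1 else 0 := by
      by_cases h : (c.contains v || c.contains ((-1) * v)) = true
      · rw [if_pos h]
        exact List.count_eq_one_of_mem (PySem.Set.nodup_ofList _)
          ((PySem.Set.mem_ofList _ _).mpr ((pv_mem_abs c v).mpr h))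
      · rw [if_neg h, List.count_eq_zero]
        intro hmem
        exact h ((pv_mem_abs c v).mp ((PySem.Set.mem_ofList _ _).mp hmem))
    rw [hset]
    split_ifs <;> push_cast <;> ring

-- ===== VERDICT (by name: the statement is the Claim_ definition above) =====
theorem positive_gain_spec : Claim_equal_positive_gain := by
  intro sol cnf _
  unfold Spec_positive_gain positive_gain positive_gain_alt
  rw [PySem.List.foldl_append_singleton_eq_map]
  simp only [List.nil_append]
  apply List.map_congr_left
  intro v _
  rw [PySem.List.foldl_count_if (fun c => c.contains v || c.contains ((-1) * v)) cnf 0]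
  rw [pv_counts_getD]
  simp
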